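-- pv_equiv track=rewrite | github.com/GkhanTpz/CookWise | utils/helpers.py | score_recipe_match
-- ===== SOURCE A (Python) =====
-- def score_recipe_match(user_ingredients, recipes):
--     scored = []  # Eşleşme skoru listesi oluşturur.
--     for dish, data in recipes.items():
--         ingredients_lower = [i.lower() for i in data["ingredients"]]  # Yemeğin malzemelerini küçük harfe çevirir.
--         matched = [u for u in user_ingredients if any(u in ing for ing in ingredients_lower)]  # Kullanıcının girdiği malzemelerle eşleşenleri bulur.
--         score = len(matched)  # Eşleşen malzemelerin sayısını skor olarak kullanır.
--         missing = [ing for ing in ingredients_lower if not any(u in ing for u in user_ingredients)]  # Eksik malzemeleri bulur.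
--         scored.append((dish, score, missing, matched, ingredients_lower))  # Skor, eksik malzemeler ve eşleşen malzemelerle birlikte yemeği kaydeder.
--     scored.sort(key=lambda x: x[1], reverse=True)  # Yemekleri skorlarına göre azalan sırayla sıralar.
--     return scored  # Sıralı eşleşme sonuçlarını döndürür.
-- ===== SOURCE B (Python) =====
-- def score_recipe_match(user_ingredients, recipes):
--     scored = []
--     for dish, data in recipes.items():
--         ingredients_lower = [i.lower() for i in data["ingredients"]]
--         hit = set()      # indices of user ingredients matched by some recipe ingredient
--         missing = []
--         for ing in ingredients_lower:
--             found = False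
--             for idx, u in enumerate(user_ingredients):
--                 if u in ing:
--                     hit.add(idx)
--                     found = True
--             if not found:
--                 missing.append(ing)
--         matched = [u for idx, u in enumerate(user_ingredients) if idx in hit]
--         scored.append((dish, len(matched), missing, matched, ingredients_lower))
--     return sorted(scored, key=lambda x: x[1], reverse=True)
-- ===== Notes on version B (the rewrite author's own statement) =====
-- stated objective: alternative
-- what changed: B replaces A's two separate any()-comprehension passes per recipe (one over user ingredients, one over recipe ingredients) with a single fused scan over the lowercased ingredients that maintains a set of matched user-ingredient indices and builds the missing list as it goes, reconstructing matched from the index set afterwards.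
-- outside the precondition, e.g. on score_recipe_match(['egg'], {'cake': {'stuff': ['Egg']}}): A raises KeyError, B raises KeyError
import Mathlib
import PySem

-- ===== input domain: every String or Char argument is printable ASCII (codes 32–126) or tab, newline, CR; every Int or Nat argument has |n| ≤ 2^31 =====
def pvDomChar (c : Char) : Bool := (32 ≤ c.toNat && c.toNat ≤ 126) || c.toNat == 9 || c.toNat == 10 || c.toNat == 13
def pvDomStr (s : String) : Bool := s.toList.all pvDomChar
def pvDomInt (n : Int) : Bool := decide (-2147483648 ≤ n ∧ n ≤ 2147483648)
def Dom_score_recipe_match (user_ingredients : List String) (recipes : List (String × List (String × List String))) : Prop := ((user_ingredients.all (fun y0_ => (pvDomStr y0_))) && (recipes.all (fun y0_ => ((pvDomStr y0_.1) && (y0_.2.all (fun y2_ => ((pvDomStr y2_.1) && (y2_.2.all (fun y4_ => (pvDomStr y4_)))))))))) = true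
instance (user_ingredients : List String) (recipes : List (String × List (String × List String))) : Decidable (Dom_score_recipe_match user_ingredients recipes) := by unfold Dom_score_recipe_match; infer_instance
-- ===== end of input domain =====

-- B fuses A's two any()-comprehension passes into ONE scan over the lowercased ingredients
-- (maintaining a set of matched user-indices and the missing list as it goes); alternative
-- decomposition, same asymptotic cost.  A sorts a local list in place; only the return value
-- is compared (neither version mutates a caller-visible argument).

-- ===== PORT A =====
-- data["ingredients"] raises KeyError when the key is absent; here ported with getD [] and
-- those inputs excluded by Pre_score_recipe_match.
def score_recipe_match (user_ingredients : List String) (recipes : List (String × List (String × List String))) : List (String × Int × List String × List String × List String) :=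
  let scored := (PySem.Dict.ofList recipes).items.foldl (fun scored p =>
    let ingredients_lower := (PySem.Dict.getD (PySem.Dict.ofList p.2) "ingredients" []).map (fun i => PySem.Str.lower i)
    let matched := user_ingredients.filter (fun u => ingredients_lower.any (fun ing => PySem.Str.isIn u ing))
    let score : Int := matched.length
    let missing := ingredients_lower.filter (fun ing => !(user_ingredients.any (fun u => PySem.Str.isIn u ing)))
    scored ++ [(p.1, score, missing, matched, ingredients_lower)]) []
  PySem.List.sorted scored (fun x => x.2.1) true

-- ===== PORT B =====
-- one fused scan over the ingredients: state = (set of matched user indices, missing list)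
def pvScanIng (user_ingredients : List String) (ings : List String) (acc : PySem.Set Int × List String) : PySem.Set Int × List String :=
  ings.foldl (fun st ing =>
    let r := (PySem.List.enumerate user_ingredients 0).foldl
      (fun (r : PySem.Set Int × Bool) q =>
        if PySem.Str.isIn q.2 ing then (PySem.Set.add r.1 q.1, true) else r)
      (st.1, false)
    (r.1, if r.2 then st.2 else st.2 ++ [ing])) acc

def score_recipe_match_alt (user_ingredients : List String) (recipes : List (String × List (String × List String))) : List (String × Int × List String × List String × List String) :=
  let scored := (PySem.Dict.ofList recipes).items.foldl (fun scored p =>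
    let ingredients_lower := (PySem.Dict.getD (PySem.Dict.ofList p.2) "ingredients" []).map (fun i => PySem.Str.lower i)
    let st := pvScanIng user_ingredients ingredients_lower (PySem.Set.empty, [])
    let matched := ((PySem.List.enumerate user_ingredients 0).filter (fun q => PySem.Set.contains st.1 q.1)).map (fun q => q.2)
    scored ++ [(p.1, (matched.length : Int), st.2, matched, ingredients_lower)]) []
  PySem.List.sorted scored (fun x => x.2.1) true

-- ===== PRECONDITION & SPEC =====
-- Pre_ excludes exactly the inputs where some recipe's data dict has no "ingredients" key:
-- there the Python A raises KeyError on data["ingredients"] (and so does the Python B).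
def Pre_score_recipe_match (user_ingredients : List String) (recipes : List (String × List (String × List String))) : Prop :=
  (recipes.all (fun p => p.2.any (fun q => q.1 == "ingredients"))) = true
instance (user_ingredients : List String) (recipes : List (String × List (String × List String))) : Decidable (Pre_score_recipe_match user_ingredients recipes) := by unfold Pre_score_recipe_match; infer_instance
def pvWitness_score_recipe_match : List String × (List (String × List (String × List String))) :=
  (["egg"], [("cake", [("ingredients", ["Egg", "Milk"])])])

def Spec_score_recipe_match (user_ingredients : List String) (recipes : List (String × List (String × List String))) (out : List (String × Int × List String × List String × List String)) : Prop := out = score_recipe_match_alt user_ingredients recipes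
instance (user_ingredients : List String) (recipes : List (String × List (String × List String))) (out : List (String × Int × List String × List String × List String)) : Decidable (Spec_score_recipe_match user_ingredients recipes out) := by unfold Spec_score_recipe_match; infer_instance

-- ===== CLAIM (what is proved, stated in full; the proofs are below) =====
def Claim_equal_score_recipe_match : Prop := ∀ (user_ingredients : List String) (recipes : List (String × List (String × List String))), Dom_score_recipe_match user_ingredients recipes → Pre_score_recipe_match user_ingredients recipes → Spec_score_recipe_match user_ingredients recipes (score_recipe_match user_ingredients recipes)

-- ===== LEMMAS AND PROOFS =====

-- proof-side name for B's inner loop (definitionally the fold inside pvScanIng)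
def pvInner (users : List String) (ing : String) (s : PySem.Set Int) : PySem.Set Int × Bool :=
  (PySem.List.enumerate users 0).foldl
    (fun (r : PySem.Set Int × Bool) q =>
      if PySem.Str.isIn q.2 ing then (PySem.Set.add r.1 q.1, true) else r)
    (s, false)

theorem pvScanIng_nil (users : List String) (acc : PySem.Set Int × List String) :
    pvScanIng users [] acc = acc := rfl

theorem pvScanIng_cons (users : List String) (ing : String) (ings : List String)
    (acc : PySem.Set Int × List String) :
    pvScanIng users (ing :: ings) acc
      = pvScanIng users ings
          ((pvInner users ing acc.1).1,
           if (pvInner users ing acc.1).2 then acc.2 else acc.2 ++ [ing]) := rfl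

-- the inner loop over any pair list: final flag and final set membership
theorem pvFold_spec (ing : String) (l : List (Int × String)) (acc : PySem.Set Int × Bool) :
    (l.foldl (fun (r : PySem.Set Int × Bool) q =>
        if PySem.Str.isIn q.2 ing then (PySem.Set.add r.1 q.1, true) else r) acc).2
      = (acc.2 || l.any (fun q => PySem.Str.isIn q.2 ing))
    ∧ ∀ j : Int, j ∈ (l.foldl (fun (r : PySem.Set Int × Bool) q =>
        if PySem.Str.isIn q.2 ing then (PySem.Set.add r.1 q.1, true) else r) acc).1
      ↔ j ∈ acc.1 ∨ ∃ q ∈ l, q.1 = j ∧ PySem.Str.isIn q.2 ing = true := by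
  induction l generalizing acc with
  | nil => simp
  | cons q l ih =>
    by_cases h : PySem.Str.isIn q.2 ing = true
    · rw [List.foldl_cons, if_pos h]
      obtain ⟨h1, h2⟩ := ih (PySem.Set.add acc.1 q.1, true)
      constructor
      · rw [h1, List.any_cons, h]
        simp only [Bool.true_or, Bool.or_true]
      · intro j
        rw [h2 j]
        show j ∈ PySem.Set.add acc.1 q.1 ∨ _ ↔ _
        rw [PySem.Set.mem_add]
        constructor
        · rintro (⟨hj | hj⟩ | ⟨q', hq', h3, h4⟩)
          · exact Or.inl hj
          · exact Or.inr ⟨q, List.mem_cons_self, hj.symm, h⟩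
          · exact Or.inr ⟨q', List.mem_cons_of_mem _ hq', h3, h4⟩
        · rintro (hj | ⟨q', hq', h3, h4⟩)
          · exact Or.inl (Or.inl hj)
          · rcases List.mem_cons.1 hq' with rfl | hq'
            · exact Or.inl (Or.inr h3.symm)
            · exact Or.inr ⟨q', hq', h3, h4⟩
    · have h0 : PySem.Str.isIn q.2 ing = false := by
        revert h; cases PySem.Str.isIn q.2 ing <;> simp
      rw [List.foldl_cons, if_neg h]
      obtain ⟨h1, h2⟩ := ih acc
      constructor
      · rw [h1, List.any_cons, h0, Bool.false_or]
      · intro j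
        rw [h2 j]
        constructor
        · rintro (hj | ⟨q', hq', h3, h4⟩)
          · exact Or.inl hj
          · exact Or.inr ⟨q', List.mem_cons_of_mem _ hq', h3, h4⟩
        · rintro (hj | ⟨q', hq', h3, h4⟩)
          · exact Or.inl hj
          · rcases List.mem_cons.1 hq' with rfl | hq'
            · rw [h0] at h4; exact absurd h4 (by simp)
            · exact Or.inr ⟨q', hq', h3, h4⟩

theorem pvEnum_any (users : List String) (s : Int) (f : String → Bool) :
    (PySem.List.enumerate users s).any (fun q => f q.2) = users.any f := by
  induction users generalizing s with
  | nil => rfl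
  | cons u us ih =>
    rw [PySem.List.enumerate_cons, List.any_cons, List.any_cons, ih]

theorem pvInner_flag (users : List String) (ing : String) (s : PySem.Set Int) :
    (pvInner users ing s).2 = users.any (fun u => PySem.Str.isIn u ing) := by
  rw [pvInner, (pvFold_spec ing (PySem.List.enumerate users 0) (s, false)).1]
  show (false || _) = _
  rw [Bool.false_or]
  exact pvEnum_any users 0 (fun u => PySem.Str.isIn u ing)

theorem pvInner_mem (users : List String) (ing : String) (s : PySem.Set Int) (j : Int) :
    j ∈ (pvInner users ing s).1
      ↔ j ∈ s ∨ ∃ q ∈ PySem.List.enumerate users 0, q.1 = j ∧ PySem.Str.isIn q.2 ing = true :=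
  (pvFold_spec ing (PySem.List.enumerate users 0) (s, false)).2 j

-- the outer loop over the lowercased ingredients
theorem pvScanIng_spec (users : List String) (ings : List String) (acc : PySem.Set Int × List String) :
    (pvScanIng users ings acc).2
      = acc.2 ++ ings.filter (fun ing => !(users.any (fun u => PySem.Str.isIn u ing)))
    ∧ ∀ j : Int, j ∈ (pvScanIng users ings acc).1
      ↔ j ∈ acc.1 ∨ ∃ q ∈ PySem.List.enumerate users 0, q.1 = j ∧
          ings.any (fun ing => PySem.Str.isIn q.2 ing) = true := by
  induction ings generalizing acc with
  | nil => simp [pvScanIng_nil]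
  | cons ing ings ih =>
    rw [pvScanIng_cons]
    obtain ⟨h1, h2⟩ := ih ((pvInner users ing acc.1).1,
      if (pvInner users ing acc.1).2 then acc.2 else acc.2 ++ [ing])
    constructor
    · rw [h1]
      show (if (pvInner users ing acc.1).2 then acc.2 else acc.2 ++ [ing]) ++ _ = _
      rw [pvInner_flag, List.filter_cons]
      by_cases hf : users.any (fun u => PySem.Str.isIn u ing) = true
      · rw [if_pos hf, hf]
        simp only [Bool.not_true, Bool.false_eq_true, if_false]
      · have hf0 : users.any (fun u => PySem.Str.isIn u ing) = false := by
          revert hf; cases users.any (fun u => PySem.Str.isIn u ing) <;> simp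
        rw [hf0]
        simp only [Bool.false_eq_true, if_false, Bool.not_false, if_true,
          List.append_assoc, List.singleton_append]
    · intro j
      rw [h2 j]
      show j ∈ (pvInner users ing acc.1).1 ∨ _ ↔ _
      rw [pvInner_mem]
      constructor
      · rintro ((hj | ⟨q, hq, h3, h4⟩) | ⟨q, hq, h3, h4⟩)
        · exact Or.inl hj
        · exact Or.inr ⟨q, hq, h3, by rw [List.any_cons, h4, Bool.true_or]⟩
        · exact Or.inr ⟨q, hq, h3, by rw [List.any_cons, h4, Bool.or_true]⟩
      · rintro (hj | ⟨q, hq, h3, h4⟩)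
        · exact Or.inl (Or.inl hj)
        · rw [List.any_cons] at h4
          rcases Bool.or_eq_true_iff.1 h4 with h5 | h5
          · exact Or.inl (Or.inr ⟨q, hq, h3, h5⟩)
          · exact Or.inr ⟨q, hq, h3, h5⟩

-- filtering enumerate by a predicate of the value only, then projecting, filters the list
theorem pvFilter_map (l : List (Int × String)) (pred : Int × String → Bool) (f : String → Bool)
    (h : ∀ p ∈ l, pred p = f p.2) :
    (l.filter pred).map (fun q => q.2) = (l.map (fun q => q.2)).filter f := by
  induction l with
  | nil => rfl
  | cons p l ih =>
    have hp := h p List.mem_cons_self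
    have ih' := ih (fun q hq => h q (List.mem_cons_of_mem _ hq))
    rw [List.map_cons, List.filter_cons, List.filter_cons, hp]
    by_cases hf : f p.2 = true
    · rw [hf]; simp only [if_true, List.map_cons, ih']
    · have hf0 : f p.2 = false := by revert hf; cases f p.2 <;> simp
      rw [hf0]; simp only [Bool.false_eq_true, if_false, ih']

-- B's matched list equals A's matched comprehension
theorem pvMatched_eq (users : List String) (ings : List String) :
    ((PySem.List.enumerate users 0).filter
        (fun q => PySem.Set.contains (pvScanIng users ings (PySem.Set.empty, [])).1 q.1)).map (fun q => q.2)
      = users.filter (fun u => ings.any (fun ing => PySem.Str.isIn u ing)) := by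
  rw [pvFilter_map _ _ (fun u => ings.any (fun ing => PySem.Str.isIn u ing)),
    PySem.List.map_snd_enumerate]
  intro p hp
  have h2 := (pvScanIng_spec users ings (PySem.Set.empty, [])).2 p.1
  have hchar : p.1 ∈ (pvScanIng users ings (PySem.Set.empty, [])).1
      ↔ ings.any (fun ing => PySem.Str.isIn p.2 ing) = true := by
    rw [h2]
    constructor
    · rintro (hj | ⟨q, hq, h3, h4⟩)
      · exact absurd hj (by simp [PySem.Set.empty])
      · -- q and p are enumerate entries with the same first component, hence q.2 = p.2
        rw [PySem.List.mem_enumerate_iff] at hq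
        rw [PySem.List.mem_enumerate_iff] at hp
        obtain ⟨k, hk, rfl⟩ := hq
        obtain ⟨k', hk', rfl⟩ := hp
        simp only [zero_add] at h3
        have : k = k' := by exact_mod_cast h3
        subst this
        exact h4
    · intro h4
      exact Or.inr ⟨p, hp, rfl, h4⟩
  cases hc : PySem.Set.contains (pvScanIng users ings (PySem.Set.empty, [])).1 p.1 with
  | true => exact (hchar.1 (PySem.Set.contains_iff _ _ |>.1 hc)).symm
  | false =>
    cases ha : ings.any (fun ing => PySem.Str.isIn p.2 ing) with
    | true =>
      have := (PySem.Set.contains_iff _ _).2 (hchar.2 ha)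
      rw [hc] at this
      exact absurd this (by simp)
    | false => rfl

-- B's missing list equals A's missing comprehension
theorem pvMissing_eq (users : List String) (ings : List String) :
    (pvScanIng users ings (PySem.Set.empty, [])).2
      = ings.filter (fun ing => !(users.any (fun u => PySem.Str.isIn u ing))) := by
  have := (pvScanIng_spec users ings (PySem.Set.empty, [])).1
  rw [this]
  rfl

-- ===== VERDICT (by name: the statement is the Claim_ definition above) =====
theorem score_recipe_match_spec : Claim_equal_score_recipe_match := by
  intro users recipes _ _
  show score_recipe_match users recipes = score_recipe_match_alt users recipes
  simp only [score_recipe_match, score_recipe_match_alt]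
  congr 1
  apply PySem.List.foldl_congr_mem
  intro scored p _
  show scored ++ _ = scored ++ _
  rw [pvMatched_eq, pvMissing_eq]
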